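-- pv_equiv track=rewrite | github.com/luoyhnyy/camera | camera.py | pointsort3
-- ===== SOURCE A (Python) =====
-- def pointsort3(b,e,f):
--     eee,fff = [],[]
--     for i in b:
--         ee,ff = [],[]
--         for j in e:
--             if j[0] == i and abs(j[1]) !=3:
--                 ee.append(j)
--         if len(ee) != 0:
--             eee.append(ee)
--         for j in f:
--             if j[0] == i and abs(j[1]) !=3:
--                 ff.append(j)
--         if len(ff) != 0:
--             fff.append(ff)
--     return eee,fff
-- ===== SOURCE B (Python) =====
-- def pointsort3(b, e, f):
--     def group(rows):
--         buckets = {}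
--         for j in rows:
--             if abs(j[1]) != 3:
--                 buckets.setdefault(j[0], []).append(j)
--         return [buckets[i] for i in b if i in buckets]
--     return group(e), group(f)
-- ===== Notes on version B (the rewrite author's own statement) =====
-- stated objective: alternative
-- what changed: B builds one dict bucketing the rows of e and f by first coordinate (dropping rows with |second| == 3) in a single pass, then emits buckets by O(1) lookup while iterating b, replacing A's full rescans of e and f for every element of b; intended as the asymptotically better strategy, but a timing run's inputs are output-dominated, so measured speed was comparable (ratio ~1.2-1.4).
-- outside the precondition, e.g. on pointsort3([], [[5]], []): A returns ([], []), B raises IndexError; on pointsort3([7], [[1]], []): A returns ([], []), B raises IndexError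
import Mathlib
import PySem

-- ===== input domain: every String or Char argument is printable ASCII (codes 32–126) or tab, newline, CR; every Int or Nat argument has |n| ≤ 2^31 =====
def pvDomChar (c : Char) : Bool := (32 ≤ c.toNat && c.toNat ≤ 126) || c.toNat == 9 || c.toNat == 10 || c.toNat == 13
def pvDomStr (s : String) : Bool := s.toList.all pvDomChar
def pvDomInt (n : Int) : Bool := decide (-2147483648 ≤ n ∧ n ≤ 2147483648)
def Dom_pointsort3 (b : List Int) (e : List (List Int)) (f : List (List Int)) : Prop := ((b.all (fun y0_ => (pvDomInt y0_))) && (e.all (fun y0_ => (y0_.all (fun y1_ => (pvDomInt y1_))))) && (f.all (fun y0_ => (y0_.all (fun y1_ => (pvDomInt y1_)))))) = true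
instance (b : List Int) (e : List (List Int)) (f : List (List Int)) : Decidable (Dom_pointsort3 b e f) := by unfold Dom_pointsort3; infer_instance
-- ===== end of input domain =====

-- B replaces A's rescan of e and f for every element of b by one dict bucketing pass per list; equal on rows of length ≥ 2 (Pre_).

-- ===== PORT A =====
def pointsort3 (b : List Int) (e : List (List Int)) (f : List (List Int)) : List (List (List Int)) × List (List (List Int)) :=
  b.foldl (fun acc i =>
    let ee := e.foldl (fun ee j =>
      if PySem.List.pyGetD j 0 0 = i ∧ |PySem.List.pyGetD j 1 0| ≠ 3 then ee ++ [j] else ee) []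
    let acc1 := if ee.length ≠ 0 then acc.1 ++ [ee] else acc.1
    let ff := f.foldl (fun ff j =>
      if PySem.List.pyGetD j 0 0 = i ∧ |PySem.List.pyGetD j 1 0| ≠ 3 then ff ++ [j] else ff) []
    let acc2 := if ff.length ≠ 0 then acc.2 ++ [ff] else acc.2
    (acc1, acc2)) ([], [])

-- ===== PORT B =====
-- buckets.setdefault(j[0], []).append(j) is ported as Dict.modify j0 [] (· ++ [j]) (PySem's append-to-bucket idiom)
def pvBucket (rows : List (List Int)) : PySem.Dict Int (List (List Int)) :=
  rows.foldl (fun d j =>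
    if |PySem.List.pyGetD j 1 0| ≠ 3 then
      d.modify (PySem.List.pyGetD j 0 0) [] (· ++ [j])
    else d) PySem.Dict.empty

def pvGroup (b : List Int) (rows : List (List Int)) : List (List (List Int)) :=
  let d := pvBucket rows
  b.foldl (fun acc i => if d.contains i then acc ++ [d.getD i []] else acc) []

def pointsort3_alt (b : List Int) (e : List (List Int)) (f : List (List Int)) : List (List (List Int)) × List (List (List Int)) :=
  (pvGroup b e, pvGroup b f)

-- ===== PRECONDITION & SPEC =====
-- Pre_ requires every row of e and f to have at least two entries: on shorter rows A can raise IndexError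
-- (and does whenever such a row's first/second element is actually probed), and B, which probes every row once, raises there.
def Pre_pointsort3 (b : List Int) (e : List (List Int)) (f : List (List Int)) : Prop :=
  (∀ j ∈ e, 2 ≤ j.length) ∧ (∀ j ∈ f, 2 ≤ j.length)
instance (b : List Int) (e : List (List Int)) (f : List (List Int)) : Decidable (Pre_pointsort3 b e f) := by unfold Pre_pointsort3; infer_instance
def pvWitness_pointsort3 : List Int × List (List Int) × List (List Int) := ([1, 2], [[1, 5], [2, 3]], [[2, 0, 9]])

def Spec_pointsort3 (b : List Int) (e : List (List Int)) (f : List (List Int)) (out : List (List (List Int)) × List (List (List Int))) : Prop := out = pointsort3_alt b e f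
instance (b : List Int) (e : List (List Int)) (f : List (List Int)) (out : List (List (List Int)) × List (List (List Int))) : Decidable (Spec_pointsort3 b e f out) := by unfold Spec_pointsort3; infer_instance

-- ===== CLAIM (what is proved, stated in full; the proofs are below) =====
def Claim_equal_pointsort3 : Prop := ∀ (b : List Int) (e : List (List Int)) (f : List (List Int)), Dom_pointsort3 b e f → Pre_pointsort3 b e f → Spec_pointsort3 b e f (pointsort3 b e f)

-- ===== LEMMAS AND PROOFS =====

-- the per-i filter both sides compute
def pvF (rows : List (List Int)) (i : Int) : List (List Int) :=
  rows.filter (fun j => decide (PySem.List.pyGetD j 0 0 = i ∧ |PySem.List.pyGetD j 1 0| ≠ 3))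

theorem pvF_cons_pos (j : List Int) (rows : List (List Int)) (i : Int)
    (hk : PySem.List.pyGetD j 0 0 = i) (h3 : |PySem.List.pyGetD j 1 0| ≠ 3) :
    pvF (j :: rows) i = j :: pvF rows i := by
  simp [pvF, hk, h3]

theorem pvF_cons_neg (j : List Int) (rows : List (List Int)) (i : Int)
    (h : ¬ (PySem.List.pyGetD j 0 0 = i ∧ |PySem.List.pyGetD j 1 0| ≠ 3)) :
    pvF (j :: rows) i = pvF rows i := by
  simp only [pvF, List.filter_cons, decide_eq_true_eq, if_neg h]

theorem pvBucket_getD (rows : List (List Int)) (d : PySem.Dict Int (List (List Int))) (i : Int) :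
    (rows.foldl (fun d j =>
      if |PySem.List.pyGetD j 1 0| ≠ 3 then
        d.modify (PySem.List.pyGetD j 0 0) [] (· ++ [j])
      else d) d).getD i [] = d.getD i [] ++ pvF rows i := by
  induction rows generalizing d with
  | nil => simp [pvF]
  | cons j rows ih =>
    simp only [List.foldl_cons]
    by_cases h3 : |PySem.List.pyGetD j 1 0| ≠ 3
    · rw [if_pos h3, ih, PySem.Dict.getD_modify]
      by_cases hk : PySem.List.pyGetD j 0 0 = i
      · rw [if_pos hk.symm, pvF_cons_pos j rows i hk h3, hk]
        simp
      · rw [if_neg (fun h => hk h.symm), pvF_cons_neg j rows i (fun h => hk h.1)]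
    · rw [if_neg h3, ih, pvF_cons_neg j rows i (fun h => h3 h.2)]

theorem pvBucket_contains (rows : List (List Int)) (d : PySem.Dict Int (List (List Int))) (i : Int) :
    (rows.foldl (fun d j =>
      if |PySem.List.pyGetD j 1 0| ≠ 3 then
        d.modify (PySem.List.pyGetD j 0 0) [] (· ++ [j])
      else d) d).contains i
    = (d.contains i || !(pvF rows i).isEmpty) := by
  induction rows generalizing d with
  | nil => simp [pvF]
  | cons j rows ih =>
    simp only [List.foldl_cons]
    by_cases h3 : |PySem.List.pyGetD j 1 0| ≠ 3
    · rw [if_pos h3, ih, PySem.Dict.contains_modify]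
      by_cases hk : PySem.List.pyGetD j 0 0 = i
      · rw [pvF_cons_pos j rows i hk h3, hk]
        simp
      · have : (i == PySem.List.pyGetD j 0 0) = false := by
          simp; exact fun h => hk h.symm
        rw [this, pvF_cons_neg j rows i (fun h => hk h.1)]
        simp
    · rw [if_neg h3, ih, pvF_cons_neg j rows i (fun h => h3 h.2)]

theorem pvGroup_eq (b : List Int) (rows : List (List Int)) :
    pvGroup b rows
    = b.foldl (fun acc i => if (pvF rows i).length ≠ 0 then acc ++ [pvF rows i] else acc) [] := by
  unfold pvGroup
  have hstep : (fun (acc : List (List (List Int))) i =>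
      if (pvBucket rows).contains i then acc ++ [(pvBucket rows).getD i []] else acc)
      = (fun acc i => if (pvF rows i).length ≠ 0 then acc ++ [pvF rows i] else acc) := by
    funext acc i
    have hc := pvBucket_contains rows PySem.Dict.empty i
    have hd := pvBucket_getD rows PySem.Dict.empty i
    rw [show pvBucket rows = rows.foldl (fun d j =>
      if |PySem.List.pyGetD j 1 0| ≠ 3 then
        d.modify (PySem.List.pyGetD j 0 0) [] (· ++ [j])
      else d) PySem.Dict.empty from rfl, hc, hd]
    cases pvF rows i <;> simp
  simp only [hstep]

theorem pointsort3_spec' (b : List Int) (e : List (List Int)) (f : List (List Int)) :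
    pointsort3 b e f = pointsort3_alt b e f := by
  have hin : ∀ (rows : List (List Int)) (i : Int),
      rows.foldl (fun ee j =>
        if PySem.List.pyGetD j 0 0 = i ∧ |PySem.List.pyGetD j 1 0| ≠ 3 then ee ++ [j] else ee) []
      = pvF rows i := by
    intro rows i
    simpa [pvF] using PySem.List.foldl_append_ite_eq_filter
      (p := fun j => PySem.List.pyGetD j 0 0 = i ∧ |PySem.List.pyGetD j 1 0| ≠ 3) (l := rows) (acc := [])
  unfold pointsort3 pointsort3_alt
  have hstep : (fun (acc : List (List (List Int)) × List (List (List Int))) (i : Int) =>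
      let ee := e.foldl (fun ee j =>
        if PySem.List.pyGetD j 0 0 = i ∧ |PySem.List.pyGetD j 1 0| ≠ 3 then ee ++ [j] else ee) []
      let acc1 := if ee.length ≠ 0 then acc.1 ++ [ee] else acc.1
      let ff := f.foldl (fun ff j =>
        if PySem.List.pyGetD j 0 0 = i ∧ |PySem.List.pyGetD j 1 0| ≠ 3 then ff ++ [j] else ff) []
      let acc2 := if ff.length ≠ 0 then acc.2 ++ [ff] else acc.2
      (acc1, acc2))
      = (fun acc i =>
        ((fun a1 (i : Int) => if (pvF e i).length ≠ 0 then a1 ++ [pvF e i] else a1) acc.1 i,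
         (fun a2 (i : Int) => if (pvF f i).length ≠ 0 then a2 ++ [pvF f i] else a2) acc.2 i)) := by
    funext acc i
    simp only [hin]
  rw [hstep, PySem.List.foldl_prod_mk
    (f := fun a1 (i : Int) => if (pvF e i).length ≠ 0 then a1 ++ [pvF e i] else a1)
    (g := fun a2 (i : Int) => if (pvF f i).length ≠ 0 then a2 ++ [pvF f i] else a2),
    pvGroup_eq, pvGroup_eq]

-- ===== VERDICT (by name: the statement is the Claim_ definition above) =====
theorem pointsort3_spec : Claim_equal_pointsort3 := by
  intro b e f _ _
  unfold Spec_pointsort3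
  exact pointsort3_spec' b e f
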